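-- pv_equiv track=rewrite | github.com/arnabs542/data_structure_and_algorithm_practice | sorting_and_searching/kth_most_frequent_word.py | kth_most_frequent_word
-- ===== SOURCE A (Python) =====
-- import heapq
--
-- def kth_most_frequent_word(arr, k):
--     heap = []
--     frequency = dict()
--     for word in arr:
--         if word in frequency:
--             frequency[word] -= 1
--         else:
--             frequency[word] = -1
--
--     for word,count in frequency.items():
--         if len(heap) > 0 and heap[0][0]==count and word > heap[0][1]:
--             top = heapq.heappop(heap)
--             heapq.heappush(heap, (count,word))
--             heapq.heappush(heap, top)
--         else:
--             heapq.heappush(heap, (count,word))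
--
--     while k > 0:
--         heapq.heappop(heap)
--         k-=1
--     return heapq.heappop(heap)
-- ===== SOURCE B (Python) =====
-- def kth_most_frequent_word(arr, k):
--     counts = {}
--     for w in arr:
--         counts[w] = counts.get(w, 0) + 1
--     ranked = sorted((-c, w) for w, c in counts.items())
--     if k < 0:
--         k = 0
--     return ranked[k]
-- ===== Notes on version B (the rewrite author's own statement) =====
-- stated objective: simpler
-- what changed: Replaces the heap with its tie-juggling push branch and the k-pop loop by counting positive frequencies once and indexing the sorted (-count, word) list directly at k (clamped to 0, as A's pop loop does).
import Mathlib
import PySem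

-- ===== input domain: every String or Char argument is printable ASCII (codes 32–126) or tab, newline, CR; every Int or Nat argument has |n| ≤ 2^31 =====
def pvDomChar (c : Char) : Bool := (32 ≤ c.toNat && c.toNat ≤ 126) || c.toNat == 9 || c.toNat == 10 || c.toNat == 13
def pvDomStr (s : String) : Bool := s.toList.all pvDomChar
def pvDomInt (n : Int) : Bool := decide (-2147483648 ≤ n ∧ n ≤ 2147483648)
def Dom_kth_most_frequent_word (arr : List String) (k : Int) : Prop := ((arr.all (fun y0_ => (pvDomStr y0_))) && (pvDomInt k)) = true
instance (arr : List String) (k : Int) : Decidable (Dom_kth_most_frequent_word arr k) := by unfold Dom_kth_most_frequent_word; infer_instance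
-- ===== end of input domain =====

-- B replaces A's heap (with its tie-juggling push branch) and k-pop loop by counting
-- positive frequencies once and indexing the sorted (-count, word) list at k: simpler.

-- ===== PORT A =====
-- heapq is ported at the priority-queue level: the heap is the multiset of its elements,
-- heap[0] / heappop observe its minimum under Python's tuple comparison (lexicographic,
-- i.e. the Prod.Lex order on Int × String), heappush adds an element.  This is exact
-- here because the Python code only ever observes heap[0] and heappop results.
def pvLexKey (p : Int × String) : Int ×ₗ String := toLex p

-- heap[0] (= the heap's minimum); none exactly when the heap is empty (IndexError)
def pvHeapMin? (h : List (Int × String)) : Option (Int × String) :=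
  PySem.List.min? h pvLexKey

-- 'while k > 0: heappop(heap); k -= 1' followed by 'return heappop(heap)';
-- the (0, "") defaults are only reached where Python raises IndexError (outside Pre_)
def popLoop (h : List (Int × String)) (k : Int) : Int × String :=
  if 0 < k then
    match pvHeapMin? h with
    | none => (0, "")
    | some m => popLoop (h.erase m) (k - 1)
  else
    (pvHeapMin? h).getD (0, "")
termination_by k.toNat
decreasing_by omega

def kth_most_frequent_word (arr : List String) (k : Int) : Int × String :=
  let frequency := arr.foldl (fun d w =>
      if d.contains w then d.insert w (d.getD w 0 - 1) else d.insert w (-1))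
    (PySem.Dict.empty : PySem.Dict String Int)
  let heap := frequency.items.foldl (fun h p =>
      match pvHeapMin? h with
      | some top =>
        if top.1 == p.2 && decide (top.2 < p.1) then
          -- top = heappop(heap); heappush((count, word)); heappush(top)
          top :: (p.2, p.1) :: h.erase top
        else (p.2, p.1) :: h
      | none => (p.2, p.1) :: h) []
  popLoop heap k

-- ===== PORT B =====
def kth_most_frequent_word_alt (arr : List String) (k : Int) : Int × String :=
  let counts := arr.foldl (fun d w => d.insert w (d.getD w 0 + 1))
    (PySem.Dict.empty : PySem.Dict String Int)
  let ranked := PySem.List.sorted2 (counts.items.map (fun p => (-p.2, p.1)))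
    (fun q => q.1) (fun q => q.2)
  -- if k < 0: k = 0
  let k := if k < 0 then 0 else k
  -- ranked[k]; none = IndexError, outside Pre_
  (PySem.List.pyGet? ranked k).getD (0, "")

-- ===== PRECONDITION & SPEC =====
-- Pre_ excludes exactly the inputs where A raises IndexError: the empty arr, and
-- k ≥ number of distinct words (the heap runs out of elements to pop).
def Pre_kth_most_frequent_word (arr : List String) (k : Int) : Prop :=
  arr ≠ [] ∧ k < ((PySem.Set.ofList arr).length : Int)
instance (arr : List String) (k : Int) : Decidable (Pre_kth_most_frequent_word arr k) := by
  unfold Pre_kth_most_frequent_word; infer_instance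

def pvWitness_kth_most_frequent_word : List String × Int := (["a", "b", "a"], 1)

def Spec_kth_most_frequent_word (arr : List String) (k : Int) (out : Int × String) : Prop :=
  out = kth_most_frequent_word_alt arr k
instance (arr : List String) (k : Int) (out : Int × String) :
    Decidable (Spec_kth_most_frequent_word arr k out) := by
  unfold Spec_kth_most_frequent_word; infer_instance

-- ===== CLAIM (what is proved, stated in full; the proofs are below) =====
def Claim_equal_kth_most_frequent_word : Prop :=
  ∀ (arr : List String) (k : Int), Dom_kth_most_frequent_word arr k →
    Pre_kth_most_frequent_word arr k →
    Spec_kth_most_frequent_word arr k (kth_most_frequent_word arr k)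

-- ===== LEMMAS AND PROOFS =====

-- the common value both programs select from: the distinct words of arr, each with
-- the negated multiplicity in front
def pvPairs (arr : List String) : List (Int × String) :=
  (PySem.Set.ofList arr).map (fun w => (-(arr.count w : Int), w))

-- A's first loop is one insert per word, of a value picked by the branch
theorem pv_step_eq : (fun (d : PySem.Dict String Int) w =>
      if d.contains w then d.insert w (d.getD w 0 - 1) else d.insert w (-1))
    = (fun d w => d.insert w (if d.contains w then d.getD w 0 - 1 else -1)) := by
  funext d w
  by_cases h : d.contains w <;> simp [h]

-- A's first loop computes the negated multiplicities
theorem pv_freq_getD (l : List String) (d : PySem.Dict String Int) (v : String) :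
    (l.foldl (fun d w =>
        if d.contains w then d.insert w (d.getD w 0 - 1) else d.insert w (-1)) d).getD v 0
      = d.getD v 0 - l.count v := by
  induction l generalizing d with
  | nil => simp
  | cons w l ih =>
    simp only [List.foldl_cons]
    rw [ih]
    have hstep : ((if d.contains w then d.insert w (d.getD w 0 - 1)
        else d.insert w (-1)) : PySem.Dict String Int).getD v 0
        = (if v = w then d.getD w 0 - 1 else d.getD v 0) := by
      by_cases hv : v = w
      · subst hv
        by_cases h : d.contains v
        · simp [h]
        · simp only [h, Bool.false_eq_true, if_false, if_true,
            PySem.Dict.getD_insert]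
          rw [PySem.Dict.getD_of_not_contains d 0 (by simpa using h)]
          simp
      · by_cases h : d.contains w <;> simp [h, hv, PySem.Dict.getD_insert]
    rw [hstep, List.count_cons]
    by_cases hv : v = w
    · subst hv
      simp only [BEq.refl, if_true]
      push_cast
      omega
    · rw [if_neg hv, if_neg (by simpa using Ne.symm hv)]
      push_cast
      omega

theorem pv_freq_items (arr : List String) :
    (arr.foldl (fun d w =>
        if d.contains w then d.insert w (d.getD w 0 - 1) else d.insert w (-1))
      (PySem.Dict.empty : PySem.Dict String Int)).items
      = (PySem.Set.ofList arr).map (fun w => (w, -(arr.count w : Int))) := by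
  have hnd : (arr.foldl (fun d w =>
        if d.contains w then d.insert w (d.getD w 0 - 1) else d.insert w (-1))
      (PySem.Dict.empty : PySem.Dict String Int)).keys.Nodup := by
    rw [pv_step_eq]
    exact PySem.Dict.nodup_keys_foldl_insert arr _ _ (by simp [PySem.Dict.keys_empty])
  have hkeys : (arr.foldl (fun d w =>
        if d.contains w then d.insert w (d.getD w 0 - 1) else d.insert w (-1))
      (PySem.Dict.empty : PySem.Dict String Int)).keys = PySem.Set.ofList arr := by
    rw [pv_step_eq, PySem.Dict.keys_foldl_insert, PySem.Dict.keys_empty]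
    rfl
  rw [PySem.Dict.items_eq_map_keys _ hnd 0, hkeys]
  refine List.map_congr_left ?_
  intro w _
  rw [pv_freq_getD, PySem.Dict.getD_empty]
  simp

-- the heap fold builds (as a multiset) exactly the swapped items: the tie-juggling
-- branch pops the minimum and pushes it right back
theorem pv_heap_perm (l : List (String × Int)) (h0 : List (Int × String)) :
    (l.foldl (fun h p =>
        match pvHeapMin? h with
        | some top =>
          if top.1 == p.2 && decide (top.2 < p.1) then
            top :: (p.2, p.1) :: h.erase top
          else (p.2, p.1) :: h
        | none => (p.2, p.1) :: h) h0).Perm (h0 ++ l.map (fun p => (p.2, p.1))) := by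
  induction l generalizing h0 with
  | nil => simp
  | cons p l ih =>
    simp only [List.foldl_cons, List.map_cons]
    have hstep : (match pvHeapMin? h0 with
        | some top =>
          if top.1 == p.2 && decide (top.2 < p.1) then
            top :: (p.2, p.1) :: h0.erase top
          else (p.2, p.1) :: h0
        | none => (p.2, p.1) :: h0).Perm ((p.2, p.1) :: h0) := by
      cases hmin : pvHeapMin? h0 with
      | none => exact List.Perm.refl _
      | some top =>
        show (if (top.1 == p.2 && decide (top.2 < p.1)) = true
            then top :: (p.2, p.1) :: h0.erase top
            else (p.2, p.1) :: h0).Perm _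
        split_ifs with hc
        · have htop : top ∈ h0 := PySem.List.min?_mem hmin
          exact (List.Perm.swap _ _ _).trans ((List.perm_cons_erase htop).symm.cons _)
        · exact List.Perm.refl _
    exact (ih _).trans ((hstep.append_right _).trans List.perm_middle.symm)

-- heap[0] of any permutation of a strictly sorted list is its head
theorem pv_min_head (h t : List (Int × String)) (y : Int × String)
    (hp : h.Perm (y :: t))
    (hs : (y :: t).Pairwise (fun a b => pvLexKey a < pvLexKey b)) :
    pvHeapMin? h = some y ∧ (h.erase y).Perm t := by
  have hne : h ≠ [] := by
    intro hnil; subst hnil; simp at hp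
  obtain ⟨m, hm⟩ : ∃ m, PySem.List.min? h pvLexKey = some m := by
    cases hmin : PySem.List.min? h pvLexKey with
    | none => exact absurd ((PySem.List.min?_eq_none_iff h pvLexKey).mp hmin) hne
    | some m => exact ⟨m, rfl⟩
  have hmem : m ∈ y :: t := hp.mem_iff.mp (PySem.List.min?_mem hm)
  have hmy : m = y := by
    rcases List.mem_cons.mp hmem with h1 | h1
    · exact h1
    · have := List.pairwise_cons.mp hs |>.1 m h1
      have h2 := PySem.List.min?_isMin hm y (hp.mem_iff.mpr (List.mem_cons_self))
      exact absurd this (not_lt.mpr h2)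
  subst hmy
  refine ⟨hm, ?_⟩
  have := hp.erase m
  simpa using this

-- popping the minimum k+1 times from any permutation of a strictly sorted list
-- is indexing that list at k
theorem pv_popLoop_eq (n : Nat) (ys h : List (Int × String)) (k : Int)
    (hn : k.toNat = n) (hk : 0 ≤ k) (hp : h.Perm ys)
    (hs : ys.Pairwise (fun a b => pvLexKey a < pvLexKey b)) :
    popLoop h k = (PySem.List.pyGet? ys k).getD (0, "") := by
  induction n generalizing ys h k with
  | zero =>
    have hk0 : k = 0 := by omega
    subst hk0
    rw [popLoop]
    simp only [lt_irrefl, if_false]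
    rw [show (0 : Int) = ((0 : Nat) : Int) from rfl, PySem.List.pyGet?_natCast]
    cases ys with
    | nil =>
      have : h = [] := by simpa using hp
      subst this
      rfl
    | cons y t =>
      rw [(pv_min_head h t y hp hs).1]
      rfl
  | succ n ih =>
    have hkpos : 0 < k := by omega
    rw [popLoop, if_pos hkpos]
    have hkn : k = ((n + 1 : Nat) : Int) := by omega
    cases ys with
    | nil =>
      have : h = [] := by simpa using hp
      subst this
      rw [show pvHeapMin? [] = none from rfl]
      simp [PySem.List.pyGet?, PySem.List.pyIdx?]
    | cons y t =>
      obtain ⟨hmin, herase⟩ := pv_min_head h t y hp hs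
      rw [hmin]
      show popLoop (h.erase y) (k - 1) = _
      rw [ih t (h.erase y) (k - 1) (by omega) (by omega) herase
        (List.pairwise_cons.mp hs).2]
      rw [hkn, PySem.List.pyGet?_natCast,
        show ((n + 1 : Nat) : Int) - 1 = ((n : Nat) : Int) by omega,
        PySem.List.pyGet?_natCast]
      rfl

-- Python's tuple comparison in sorted2 is the Prod.Lex order
theorem pv_before_eq (a b : Int × String) :
    (decide (a.1 < b.1) || !decide (b.1 < a.1) && decide (a.2 < b.2))
      = decide (pvLexKey a < pvLexKey b) := by
  have h : (pvLexKey a < pvLexKey b) ↔ (a.1 < b.1 ∨ a.1 = b.1 ∧ a.2 < b.2) :=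
    Prod.Lex.toLex_lt_toLex
  rw [show decide (pvLexKey a < pvLexKey b) = decide (a.1 < b.1 ∨ a.1 = b.1 ∧ a.2 < b.2)
    from decide_eq_decide.mpr h]
  rcases lt_trichotomy a.1 b.1 with h1 | h1 | h1 <;>
    simp [h1, lt_asymm, ne_of_lt, ne_of_gt]

theorem pv_insertBy_congr {α : Type} (f g : α → α → Bool) (x : α) (l : List α)
    (hfg : ∀ a b, f a b = g a b) :
    PySem.List.insertBy f x l = PySem.List.insertBy g x l := by
  induction l with
  | nil => rfl
  | cons y ys ih => simp only [PySem.List.insertBy, hfg]; rw [ih]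

theorem pv_sorted2_eq_sorted_lex (xs : List (Int × String)) :
    PySem.List.sorted2 xs (fun q => q.1) (fun q => q.2)
      = PySem.List.sorted xs pvLexKey := by
  show List.foldl _ [] xs = List.foldl _ [] xs
  suffices h : ∀ acc : List (Int × String), List.foldl
      (fun acc x => PySem.List.insertBy (fun a b =>
        decide (a.1 < b.1) || !decide (b.1 < a.1) && decide (a.2 < b.2)) x acc) acc xs
    = List.foldl (fun acc x => PySem.List.insertBy
        (fun a b => decide (pvLexKey a < pvLexKey b)) x acc) acc xs from h []
  induction xs with
  | nil => intro acc; rfl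
  | cons y ys ih =>
    intro acc
    simp only [List.foldl_cons]
    rw [pv_insertBy_congr _ _ _ _ pv_before_eq, ih]

theorem pv_alt_eq (arr : List String) (k : Int) :
    kth_most_frequent_word_alt arr k
      = (PySem.List.pyGet? (PySem.List.sorted (pvPairs arr) pvLexKey)
          (if k < 0 then 0 else k)).getD (0, "") := by
  show (PySem.List.pyGet? (PySem.List.sorted2 _ _ _) _).getD (0, "") = _
  rw [PySem.Dict.foldl_insert_getD_add_one_eq_counter, PySem.Dict.items_counter,
    List.map_map, pv_sorted2_eq_sorted_lex]
  rfl

theorem pv_pairs_nodup (arr : List String) : (pvPairs arr).Nodup := by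
  refine (PySem.Set.nodup_ofList arr).map ?_
  intro w1 w2 h
  exact (Prod.mk.injEq _ _ _ _).mp h |>.2

theorem pv_sorted_pairs_strict (arr : List String) :
    (PySem.List.sorted (pvPairs arr) pvLexKey).Pairwise
      (fun a b => pvLexKey a < pvLexKey b) := by
  have hle := PySem.List.sorted_pairwise (pvPairs arr) pvLexKey
  have hnd : (PySem.List.sorted (pvPairs arr) pvLexKey).Nodup :=
    (PySem.List.sorted_perm (pvPairs arr) pvLexKey false).nodup_iff.mpr (pv_pairs_nodup arr)
  refine (hle.and hnd).imp ?_
  rintro a b ⟨hab, hne⟩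
  exact lt_of_le_of_ne hab (fun h => hne (toLex.injective h))

-- ===== VERDICT (by name: the statement is the Claim_ definition above) =====
theorem kth_most_frequent_word_spec : Claim_equal_kth_most_frequent_word := by
  intro arr k _ hpre
  unfold Spec_kth_most_frequent_word
  rw [pv_alt_eq]
  have hperm : (((arr.foldl (fun d w =>
        if d.contains w then d.insert w (d.getD w 0 - 1) else d.insert w (-1))
      (PySem.Dict.empty : PySem.Dict String Int)).items).foldl (fun h p =>
        match pvHeapMin? h with
        | some top =>
          if top.1 == p.2 && decide (top.2 < p.1) then
            top :: (p.2, p.1) :: h.erase top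
          else (p.2, p.1) :: h
        | none => (p.2, p.1) :: h) []).Perm
      (PySem.List.sorted (pvPairs arr) pvLexKey) := by
    refine (pv_heap_perm _ []).trans ?_
    rw [pv_freq_items, List.nil_append, List.map_map]
    exact (PySem.List.sorted_perm (pvPairs arr) pvLexKey false).symm
  by_cases hk : 0 ≤ k
  · rw [if_neg (not_lt.mpr hk)]
    exact (pv_popLoop_eq k.toNat _ _ k rfl hk hperm (pv_sorted_pairs_strict arr)).symm ▸ rfl
  · rw [if_pos (by omega)]
    have h0 := pv_popLoop_eq 0 (PySem.List.sorted (pvPairs arr) pvLexKey) _ 0 rfl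
      (le_refl 0) hperm (pv_sorted_pairs_strict arr)
    show popLoop _ k = _
    rw [popLoop, if_neg (by omega)]
    rw [popLoop, if_neg (by omega)] at h0
    exact h0
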